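-- pv_equiv track=rewrite | github.com/Abhi-data-analyst/Python_Data_Analytics_Journey | Day12_Boss.py | sales_analysis
-- ===== SOURCE A (Python) =====
-- def sales_analysis(list):
--     refund_count=0
--     sale_count=0
--     refund_sum=0
--     sale_sum=0
--     for x in list:
--         if x ==0:
--             continue
--         if x>0:
--             sale_count+=1
--             sale_sum+=x
--         else:
--             refund_count+=1
--             refund_sum+=x
--     net=(sale_sum-(-refund_sum))
--     return refund_count,refund_sum,sale_count,sale_sum,net
-- ===== SOURCE B (Python) =====
-- def sales_analysis(list):
--     positives = [x for x in list if x > 0]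
--     negatives = [x for x in list if x < 0]
--     sale_count = len(positives)
--     sale_sum = sum(positives)
--     refund_count = len(negatives)
--     refund_sum = sum(negatives)
--     net = sale_sum + refund_sum
--     return refund_count, refund_sum, sale_count, sale_sum, net
-- ===== Notes on version B (the rewrite author's own statement) =====
-- stated objective: simpler
-- what changed: Replaces the single interleaved accumulation loop with two filtered lists (positives/negatives) followed by len/sum reductions, deriving net via addition instead of double negation.
import Mathlib
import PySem

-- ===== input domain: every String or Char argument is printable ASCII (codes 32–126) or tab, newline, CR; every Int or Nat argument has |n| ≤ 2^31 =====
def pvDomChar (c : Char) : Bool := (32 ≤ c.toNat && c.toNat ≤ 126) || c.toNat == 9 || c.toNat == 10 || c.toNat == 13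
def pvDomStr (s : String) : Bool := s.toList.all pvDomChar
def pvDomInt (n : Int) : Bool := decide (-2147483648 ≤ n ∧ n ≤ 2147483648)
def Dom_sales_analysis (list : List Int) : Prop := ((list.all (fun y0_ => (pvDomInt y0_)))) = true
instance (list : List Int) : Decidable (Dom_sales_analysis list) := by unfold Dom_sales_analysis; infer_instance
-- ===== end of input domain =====

-- B replaces A's single interleaved accumulation loop with filter-then-reduce passes (simpler decomposition).

-- ===== PORT A =====
-- loop body of A: state is (refund_count, refund_sum, sale_count, sale_sum)
def salesStep (s : Int × Int × Int × Int) (x : Int) : Int × Int × Int × Int :=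
  let (rc, rs, sc, ss) := s
  if x == 0 then (rc, rs, sc, ss)
  else if x > 0 then (rc, rs, sc + 1, ss + x)
  else (rc + 1, rs + x, sc, ss)

-- state: (refund_count, refund_sum, sale_count, sale_sum)
def sales_analysis (list : List Int) : Int × Int × Int × Int × Int :=
  let st := list.foldl salesStep (0, 0, 0, 0)
  let (rc, rs, sc, ss) := st
  let net := ss - (-rs)
  (rc, rs, sc, ss, net)

-- ===== PORT B =====
def sales_analysis_alt (list : List Int) : Int × Int × Int × Int × Int :=
  let positives := list.filter (fun x => x > 0)
  let negatives := list.filter (fun x => x < 0)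
  let sale_count : Int := positives.length
  let sale_sum := positives.sum
  let refund_count : Int := negatives.length
  let refund_sum := negatives.sum
  let net := sale_sum + refund_sum
  (refund_count, refund_sum, sale_count, sale_sum, net)

-- ===== PRECONDITION & SPEC =====
def Spec_sales_analysis (list : List Int) (out : Int × Int × Int × Int × Int) : Prop := out = sales_analysis_alt list
instance (list : List Int) (out : Int × Int × Int × Int × Int) : Decidable (Spec_sales_analysis list out) := by unfold Spec_sales_analysis; infer_instance

-- ===== CLAIM (what is proved, stated in full; the proofs are below) =====
def Claim_equal_sales_analysis : Prop := ∀ (list : List Int), Dom_sales_analysis list → Spec_sales_analysis list (sales_analysis list)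

-- ===== LEMMAS AND PROOFS =====

-- loop invariant: the fold from an arbitrary state adds the filter-based aggregates componentwise
theorem sales_analysis_fold (list : List Int) (rc rs sc ss : Int) :
    list.foldl salesStep (rc, rs, sc, ss)
    = (rc + (list.filter (fun x => x < 0)).length,
       rs + (list.filter (fun x => x < 0)).sum,
       sc + (list.filter (fun x => x > 0)).length,
       ss + (list.filter (fun x => x > 0)).sum) := by
  induction list generalizing rc rs sc ss with
  | nil => simp
  | cons a t ih =>
    simp only [List.foldl_cons, List.filter_cons]
    by_cases h0 : a = 0
    · subst h0
      simp only [salesStep]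
      simp [ih]
    · by_cases hp : a > 0
      · have hn : ¬ (a < 0) := by omega
        simp only [salesStep]
        rw [if_neg (by simpa using h0), if_pos hp, ih]
        simp [hn, hp]
        refine ⟨by ring, by ring⟩
      · have hn : a < 0 := by omega
        simp only [salesStep]
        rw [if_neg (by simpa using h0), if_neg hp, ih]
        simp [hn, hp]
        refine ⟨by ring, by ring⟩

-- ===== VERDICT (by name: the statement is the Claim_ definition above) =====
theorem sales_analysis_spec : Claim_equal_sales_analysis := by
  intro list _
  unfold Spec_sales_analysis sales_analysis sales_analysis_alt
  simp only [sales_analysis_fold]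
  simp
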